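-- pv_equiv track=rewrite | github.com/Adelost/historical-pattern-index | scripts/update_readme.py | generate_saved_driver_summary
-- ===== SOURCE A (Python) =====
-- def generate_saved_driver_summary(lost_entries, saved_entries):
--     """Generate driver summary table for KNOWLEDGE_SAVED.md (cross-reference)."""
--     # Group entries by driver
--     drivers = {}
--
--     for entry in lost_entries:
--         driver = entry.get("driver", "unknown")
--         if driver not in drivers:
--             drivers[driver] = {"lost": [], "rescued": [], "recovered": []}
--         drivers[driver]["lost"].append(entry.get("name", "Unknown"))
--
--     for entry in saved_entries:
--         driver = entry.get("driver", "unknown")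
--         if driver not in drivers:
--             drivers[driver] = {"lost": [], "rescued": [], "recovered": []}
--
--         saved_by = entry.get("saved_by", "")
--         if saved_by == "hidden_and_recovered":
--             drivers[driver]["recovered"].append(entry.get("name", "Unknown"))
--         else:
--             drivers[driver]["rescued"].append(entry.get("name", "Unknown"))
--
--     lines = ["| Driver | Lost | Rescued | Recovered |",
--              "|--------|------|---------|-----------|"]
--
--     # Sort by total entries
--     for driver in ["religious_ideology", "ethnic_ideology", "political_ideology", "conquest", "economic_exploitation"]:
--         if driver not in drivers:
--             continue
--         d = drivers[driver]
--         # Take first 2 examples max for readability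
--         lost = ", ".join(d["lost"][:2]) or "—"
--         rescued = ", ".join(d["rescued"][:2]) or "—"
--         recovered = ", ".join(d["recovered"][:2]) or "—"
--         lines.append(f"| {driver} | {lost} | {rescued} | {recovered} |")
--
--     return "\n".join(lines)
-- ===== SOURCE B (Python) =====
-- def generate_saved_driver_summary(lost_entries, saved_entries):
--     """Generate driver summary table for KNOWLEDGE_SAVED.md (cross-reference)."""
--     lines = ["| Driver | Lost | Rescued | Recovered |",
--              "|--------|------|---------|-----------|"]
--     # One pass per known driver: no intermediate driver->lists dict is built.
--     for driver in ["religious_ideology", "ethnic_ideology", "political_ideology",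
--                    "conquest", "economic_exploitation"]:
--         lost = [e.get("name", "Unknown") for e in lost_entries
--                 if e.get("driver", "unknown") == driver]
--         recovered = [e.get("name", "Unknown") for e in saved_entries
--                      if e.get("driver", "unknown") == driver
--                      and e.get("saved_by", "") == "hidden_and_recovered"]
--         rescued = [e.get("name", "Unknown") for e in saved_entries
--                    if e.get("driver", "unknown") == driver
--                    and e.get("saved_by", "") != "hidden_and_recovered"]
--         if not (lost or rescued or recovered):
--             continue
--         lines.append("| %s | %s | %s | %s |" % (
--             driver,
--             ", ".join(lost[:2]) or "—",
--             ", ".join(rescued[:2]) or "—",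
--             ", ".join(recovered[:2]) or "—"))
--     return "\n".join(lines)
-- ===== Notes on version B (the rewrite author's own statement) =====
-- stated objective: simpler
-- what changed: B drops A's driver->{lost,rescued,recovered} dict-grouping phase entirely and instead, for each of the five fixed drivers, directly scans lost_entries and saved_entries with list comprehensions to collect the three name lists, emitting a row when any list is nonempty.
import Mathlib
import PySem

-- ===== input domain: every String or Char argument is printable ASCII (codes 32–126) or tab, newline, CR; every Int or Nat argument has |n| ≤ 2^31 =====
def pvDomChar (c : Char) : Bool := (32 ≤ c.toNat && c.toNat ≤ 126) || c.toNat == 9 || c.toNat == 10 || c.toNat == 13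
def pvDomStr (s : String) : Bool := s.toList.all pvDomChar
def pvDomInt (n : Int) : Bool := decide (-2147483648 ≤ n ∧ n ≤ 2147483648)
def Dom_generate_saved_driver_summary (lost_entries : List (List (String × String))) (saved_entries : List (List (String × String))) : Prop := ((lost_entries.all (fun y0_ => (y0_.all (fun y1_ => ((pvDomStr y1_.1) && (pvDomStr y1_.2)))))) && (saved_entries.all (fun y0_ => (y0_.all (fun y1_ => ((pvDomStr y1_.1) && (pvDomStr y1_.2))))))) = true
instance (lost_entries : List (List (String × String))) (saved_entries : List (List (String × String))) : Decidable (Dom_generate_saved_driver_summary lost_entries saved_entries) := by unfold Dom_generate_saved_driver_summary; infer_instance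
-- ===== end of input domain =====

-- ===== PORT A =====
-- B replaces A's dict-grouping phase by a direct per-driver scan of both entry lists (objective: simpler).
-- entry.get(k, dflt) on an entry dict (assoc list, first match wins)
def pvGet (e : List (String × String)) (k dflt : String) : String :=
  (List.lookup k e).getD dflt

-- ", ".join(xs[:2]) or "\u2014"   (xs[:2] on a nonnegative literal bound = List.take 2, exact)
def pvCell (xs : List String) : String :=
  let s := PySem.Str.join ", " (xs.take 2)
  if s == "" then "—" else s

-- the fixed driver order of the final loop
def pvDriverList : List String :=
  ["religious_ideology", "ethnic_ideology", "political_ideology", "conquest", "economic_exploitation"]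

-- first grouping loop of A: for entry in lost_entries: …
def pvStep1 (d : PySem.Dict String (List String × List String × List String))
    (e : List (String × String)) : PySem.Dict String (List String × List String × List String) :=
  let driver := pvGet e "driver" "unknown"
  let d := if d.contains driver then d else d.insert driver ([], [], [])
  d.modify driver ([], [], []) (fun r => (r.1 ++ [pvGet e "name" "Unknown"], r.2.1, r.2.2))

-- second grouping loop of A: for entry in saved_entries: …
def pvStep2 (d : PySem.Dict String (List String × List String × List String))
    (e : List (String × String)) : PySem.Dict String (List String × List String × List String) :=
  let driver := pvGet e "driver" "unknown"
  let d := if d.contains driver then d else d.insert driver ([], [], [])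
  let saved_by := pvGet e "saved_by" ""
  if saved_by == "hidden_and_recovered" then
    d.modify driver ([], [], []) (fun r => (r.1, r.2.1, r.2.2 ++ [pvGet e "name" "Unknown"]))
  else
    d.modify driver ([], [], []) (fun r => (r.1, r.2.1 ++ [pvGet e "name" "Unknown"], r.2.2))

def generate_saved_driver_summary (lost_entries : List (List (String × String))) (saved_entries : List (List (String × String))) : String :=
  let drivers := saved_entries.foldl pvStep2 (lost_entries.foldl pvStep1 PySem.Dict.empty)
  let lines := pvDriverList.foldl (fun lines driver =>
    if drivers.contains driver = false then lines
    else
      let d := drivers.getD driver ([], [], [])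
      lines ++ [PySem.Str.join "" ["| ", driver, " | ", pvCell d.1, " | ", pvCell d.2.1, " | ", pvCell d.2.2, " |"]])
    ["| Driver | Lost | Rescued | Recovered |", "|--------|------|---------|-----------|"]
  PySem.Str.join "\n" lines

-- ===== PORT B =====
def generate_saved_driver_summary_alt (lost_entries : List (List (String × String))) (saved_entries : List (List (String × String))) : String :=
  let lines := pvDriverList.foldl (fun lines driver =>
    let lost := (lost_entries.filter (fun e => pvGet e "driver" "unknown" == driver)).map
      (fun e => pvGet e "name" "Unknown")
    let recovered := (saved_entries.filter (fun e =>
        pvGet e "driver" "unknown" == driver && pvGet e "saved_by" "" == "hidden_and_recovered")).map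
      (fun e => pvGet e "name" "Unknown")
    let rescued := (saved_entries.filter (fun e =>
        pvGet e "driver" "unknown" == driver && !(pvGet e "saved_by" "" == "hidden_and_recovered"))).map
      (fun e => pvGet e "name" "Unknown")
    if lost.isEmpty && rescued.isEmpty && recovered.isEmpty then lines
    else lines ++ [PySem.Str.join "" ["| ", driver, " | ", pvCell lost, " | ", pvCell rescued, " | ", pvCell recovered, " |"]])
    ["| Driver | Lost | Rescued | Recovered |", "|--------|------|---------|-----------|"]
  PySem.Str.join "\n" lines

-- ===== PRECONDITION & SPEC =====
def Spec_generate_saved_driver_summary (lost_entries : List (List (String × String))) (saved_entries : List (List (String × String))) (out : String) : Prop := out = generate_saved_driver_summary_alt lost_entries saved_entries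
instance (lost_entries : List (List (String × String))) (saved_entries : List (List (String × String))) (out : String) : Decidable (Spec_generate_saved_driver_summary lost_entries saved_entries out) := by unfold Spec_generate_saved_driver_summary; infer_instance

-- ===== CLAIM (what is proved, stated in full; the proofs are below) =====
def Claim_equal_generate_saved_driver_summary : Prop := ∀ (lost_entries : List (List (String × String))) (saved_entries : List (List (String × String))), Dom_generate_saved_driver_summary lost_entries saved_entries → Spec_generate_saved_driver_summary lost_entries saved_entries (generate_saved_driver_summary lost_entries saved_entries)

-- ===== LEMMAS AND PROOFS =====
-- names of lost entries with the given driver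
def pvF1 (l : List (List (String × String))) (k : String) : List String :=
  (l.filter (fun e => pvGet e "driver" "unknown" == k)).map (fun e => pvGet e "name" "Unknown")
-- names of saved entries with the given driver, split on saved_by
def pvF2 (l : List (List (String × String))) (k : String) : List String :=
  (l.filter (fun e => pvGet e "driver" "unknown" == k && !(pvGet e "saved_by" "" == "hidden_and_recovered"))).map
    (fun e => pvGet e "name" "Unknown")
def pvF3 (l : List (List (String × String))) (k : String) : List String :=
  (l.filter (fun e => pvGet e "driver" "unknown" == k && pvGet e "saved_by" "" == "hidden_and_recovered")).map
    (fun e => pvGet e "name" "Unknown")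

theorem step1_getD (d : PySem.Dict String (List String × List String × List String))
    (e : List (String × String)) (k : String) :
    (pvStep1 d e).getD k ([], [], []) =
      if pvGet e "driver" "unknown" = k then
        ((d.getD k ([], [], [])).1 ++ [pvGet e "name" "Unknown"],
          (d.getD k ([], [], [])).2.1, (d.getD k ([], [], [])).2.2)
      else d.getD k ([], [], []) := by
  unfold pvStep1
  by_cases h : pvGet e "driver" "unknown" = k
  · subst h
    cases hc : d.contains (pvGet e "driver" "unknown")
    · simp [hc, PySem.Dict.getD_modify, PySem.Dict.getD_insert,
        PySem.Dict.getD_of_not_contains d _ hc]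
    · simp [hc, PySem.Dict.getD_modify]
  · have h' : k ≠ pvGet e "driver" "unknown" := fun hk => h hk.symm
    cases hc : d.contains (pvGet e "driver" "unknown") <;>
      simp [hc, PySem.Dict.getD_modify, PySem.Dict.getD_insert, h, h']

theorem step1_contains (d : PySem.Dict String (List String × List String × List String))
    (e : List (String × String)) (k : String) :
    (pvStep1 d e).contains k = (d.contains k || pvGet e "driver" "unknown" == k) := by
  unfold pvStep1
  by_cases h : pvGet e "driver" "unknown" = k
  · subst h
    cases hc : d.contains (pvGet e "driver" "unknown") <;>
      simp [hc, PySem.Dict.contains_modify, PySem.Dict.contains_insert]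
  · have h' : k ≠ pvGet e "driver" "unknown" := fun hk => h hk.symm
    have hb : (k == pvGet e "driver" "unknown") = false := beq_eq_false_iff_ne.mpr h'
    have hb' : (pvGet e "driver" "unknown" == k) = false := beq_eq_false_iff_ne.mpr h
    cases hc : d.contains (pvGet e "driver" "unknown") <;>
      simp [hc, PySem.Dict.contains_modify, PySem.Dict.contains_insert, hb, hb']

theorem step2_getD (d : PySem.Dict String (List String × List String × List String))
    (e : List (String × String)) (k : String) :
    (pvStep2 d e).getD k ([], [], []) =
      if pvGet e "driver" "unknown" = k then
        (if pvGet e "saved_by" "" = "hidden_and_recovered" then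
          ((d.getD k ([], [], [])).1, (d.getD k ([], [], [])).2.1,
            (d.getD k ([], [], [])).2.2 ++ [pvGet e "name" "Unknown"])
        else
          ((d.getD k ([], [], [])).1, (d.getD k ([], [], [])).2.1 ++ [pvGet e "name" "Unknown"],
            (d.getD k ([], [], [])).2.2))
      else d.getD k ([], [], []) := by
  unfold pvStep2
  by_cases h : pvGet e "driver" "unknown" = k
  · subst h
    by_cases hs : pvGet e "saved_by" "" = "hidden_and_recovered" <;>
      cases hc : d.contains (pvGet e "driver" "unknown")
    · simp [hs, hc, PySem.Dict.getD_modify, PySem.Dict.getD_insert,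
        PySem.Dict.getD_of_not_contains d _ hc]
    · simp [hs, hc, PySem.Dict.getD_modify]
    · simp [hs, hc, PySem.Dict.getD_modify, PySem.Dict.getD_insert,
        PySem.Dict.getD_of_not_contains d _ hc]
    · simp [hs, hc, PySem.Dict.getD_modify]
  · have h' : k ≠ pvGet e "driver" "unknown" := fun hk => h hk.symm
    by_cases hs : pvGet e "saved_by" "" = "hidden_and_recovered" <;>
      cases hc : d.contains (pvGet e "driver" "unknown") <;>
      simp [hs, hc, PySem.Dict.getD_modify, PySem.Dict.getD_insert, h, h']

theorem step2_contains (d : PySem.Dict String (List String × List String × List String))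
    (e : List (String × String)) (k : String) :
    (pvStep2 d e).contains k = (d.contains k || pvGet e "driver" "unknown" == k) := by
  unfold pvStep2
  by_cases h : pvGet e "driver" "unknown" = k
  · subst h
    by_cases hs : pvGet e "saved_by" "" = "hidden_and_recovered" <;>
      cases hc : d.contains (pvGet e "driver" "unknown") <;>
      simp [hs, hc, PySem.Dict.contains_modify, PySem.Dict.contains_insert]
  · have h' : k ≠ pvGet e "driver" "unknown" := fun hk => h hk.symm
    have hb : (k == pvGet e "driver" "unknown") = false := beq_eq_false_iff_ne.mpr h'
    have hb' : (pvGet e "driver" "unknown" == k) = false := beq_eq_false_iff_ne.mpr h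
    by_cases hs : pvGet e "saved_by" "" = "hidden_and_recovered" <;>
      cases hc : d.contains (pvGet e "driver" "unknown") <;>
      simp [hs, hc, PySem.Dict.contains_modify, PySem.Dict.contains_insert, hb, hb']

theorem foldl1_getD (l : List (List (String × String))) (d : PySem.Dict String (List String × List String × List String)) (k : String) :
    (l.foldl pvStep1 d).getD k ([], [], []) =
      ((d.getD k ([], [], [])).1 ++ pvF1 l k, (d.getD k ([], [], [])).2.1, (d.getD k ([], [], [])).2.2) := by
  induction l generalizing d with
  | nil => simp [pvF1]
  | cons e l ih =>
    rw [List.foldl_cons, ih, step1_getD]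
    by_cases h : pvGet e "driver" "unknown" = k <;>
      simp [pvF1, h]

theorem foldl1_contains (l : List (List (String × String))) (d : PySem.Dict String (List String × List String × List String)) (k : String) :
    (l.foldl pvStep1 d).contains k = (d.contains k || !(pvF1 l k).isEmpty) := by
  induction l generalizing d with
  | nil => simp [pvF1]
  | cons e l ih =>
    rw [List.foldl_cons, ih, step1_contains]
    by_cases h : pvGet e "driver" "unknown" = k <;>
      simp [pvF1, h, Bool.or_assoc, Bool.or_comm]

theorem foldl2_getD (l : List (List (String × String))) (d : PySem.Dict String (List String × List String × List String)) (k : String) :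
    (l.foldl pvStep2 d).getD k ([], [], []) =
      ((d.getD k ([], [], [])).1, (d.getD k ([], [], [])).2.1 ++ pvF2 l k, (d.getD k ([], [], [])).2.2 ++ pvF3 l k) := by
  induction l generalizing d with
  | nil => simp [pvF2, pvF3]
  | cons e l ih =>
    rw [List.foldl_cons, ih, step2_getD]
    by_cases h : pvGet e "driver" "unknown" = k <;>
      by_cases hs : pvGet e "saved_by" "" = "hidden_and_recovered" <;>
      simp [pvF2, pvF3, h, hs]

theorem foldl2_contains (l : List (List (String × String))) (d : PySem.Dict String (List String × List String × List String)) (k : String) :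
    (l.foldl pvStep2 d).contains k = (d.contains k || !(pvF2 l k).isEmpty || !(pvF3 l k).isEmpty) := by
  induction l generalizing d with
  | nil => simp [pvF2, pvF3]
  | cons e l ih =>
    rw [List.foldl_cons, ih, step2_contains]
    by_cases h : pvGet e "driver" "unknown" = k <;>
      by_cases hs : pvGet e "saved_by" "" = "hidden_and_recovered" <;>
      simp [pvF2, pvF3, h, hs, Bool.or_assoc, Bool.or_comm] <;>
      cases d.contains k <;> simp [beq_eq_false_iff_ne.mpr h]

theorem drivers_getD (lost saved : List (List (String × String))) (k : String) :
    (saved.foldl pvStep2 (lost.foldl pvStep1 PySem.Dict.empty)).getD k ([], [], []) =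
      (pvF1 lost k, pvF2 saved k, pvF3 saved k) := by
  simp [foldl2_getD, foldl1_getD, PySem.Dict.getD_empty]

theorem drivers_contains (lost saved : List (List (String × String))) (k : String) :
    (saved.foldl pvStep2 (lost.foldl pvStep1 PySem.Dict.empty)).contains k =
      !((pvF1 lost k).isEmpty && (pvF2 saved k).isEmpty && (pvF3 saved k).isEmpty) := by
  simp [foldl2_contains, foldl1_contains, PySem.Dict.contains_empty]

-- ===== VERDICT (by name: the statement is the Claim_ definition above) =====
theorem generate_saved_driver_summary_spec : Claim_equal_generate_saved_driver_summary := by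
  intro lost saved _
  unfold Spec_generate_saved_driver_summary generate_saved_driver_summary generate_saved_driver_summary_alt
  simp only [pvDriverList, List.foldl, drivers_getD, drivers_contains, Bool.not_eq_false',
    Bool.not_eq_eq_eq_not, Bool.not_false, pvF1, pvF2, pvF3]
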